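-- pv_equiv track=rewrite | github.com/WilliamQD/TailorResume | src/jobplanner/latex/renderer.py | _trim_items_to_width
-- ===== SOURCE A (Python) =====
-- def _trim_items_to_width(
--     prefix: str,
--     items: list[str],
--     max_chars: int,
--     separator: str = ", ",
-- ) -> list[str]:
--     """Drop items from the END of the list until ``prefix + join(items)`` fits.
--
--     Operates on visible text (pre-LaTeX-escape) so the character count
--     matches what the reader sees. Returns a (possibly shorter) copy of
--     ``items``; does not mutate the input.
--     """
--     trimmed = list(items)
--     while trimmed:
--         rendered = prefix + separator.join(trimmed)
--         if len(rendered) <= max_chars: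
--             return trimmed
--         trimmed.pop()
--     return trimmed
-- ===== SOURCE B (Python) =====
-- def _trim_items_to_width(
--     prefix: str,
--     items: list[str],
--     max_chars: int,
--     separator: str = ", ",
-- ) -> list[str]:
--     """Single forward pass: grow the rendered width item by item and cut at
--     the first item that would overflow.  The rendered width only grows with
--     the number of items, so this equals trimming from the end."""
--     sep_len = len(separator)
--     width = len(prefix)
--     k = 0
--     for item in items:
--         width += len(item) + (sep_len if k else 0)
--         if width > max_chars:
--             break
--         k += 1
--     return items[:k]
-- ===== Notes on version B (the rewrite author's own statement) =====
-- stated objective: faster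
-- what changed: B replaces A's pop-from-the-end loop that re-joins the whole list each iteration with a single forward pass keeping a running width and cutting at the first overflowing item (valid because the rendered width is monotone in the item count).
import Mathlib
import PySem

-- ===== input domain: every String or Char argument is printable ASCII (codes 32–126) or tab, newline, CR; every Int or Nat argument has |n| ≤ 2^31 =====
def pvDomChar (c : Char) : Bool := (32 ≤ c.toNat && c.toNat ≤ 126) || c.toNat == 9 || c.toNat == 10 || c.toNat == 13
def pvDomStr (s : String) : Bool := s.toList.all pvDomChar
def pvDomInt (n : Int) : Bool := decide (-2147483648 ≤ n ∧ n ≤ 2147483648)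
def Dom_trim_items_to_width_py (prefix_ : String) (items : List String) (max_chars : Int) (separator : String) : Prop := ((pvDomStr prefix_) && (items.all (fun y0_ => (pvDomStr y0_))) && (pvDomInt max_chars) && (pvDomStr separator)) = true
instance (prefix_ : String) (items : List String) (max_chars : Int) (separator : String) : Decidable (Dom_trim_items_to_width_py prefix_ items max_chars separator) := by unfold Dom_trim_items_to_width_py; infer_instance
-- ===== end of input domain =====

-- B replaces A's pop-from-the-end loop that re-joins the whole list each iteration with a
-- single forward pass keeping a running width and cutting at the first overflowing item
-- (the rendered width is monotone in the item count); objective: faster.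

-- ===== PORT A =====
-- 'while trimmed: rendered = prefix + separator.join(trimmed); if len(rendered) <= max_chars: return trimmed; trimmed.pop()'
def trimLoopA (prefix_ separator : String) (max_chars : Int) (trimmed : List String) : List String :=
  if h : trimmed = [] then trimmed
  else
    if PySem.Str.len (prefix_ ++ PySem.Str.join separator trimmed) ≤ max_chars then trimmed
    else trimLoopA prefix_ separator max_chars trimmed.dropLast
termination_by trimmed.length
decreasing_by
  have : trimmed.length ≠ 0 := fun hl => h (List.eq_nil_of_length_eq_zero hl)
  simp [List.length_dropLast]; omega

def trim_items_to_width_py (prefix_ : String) (items : List String) (max_chars : Int) (separator : String) : List String :=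
  trimLoopA prefix_ separator max_chars items

-- ===== PORT B =====
-- 'for item in items: width += len(item) + (sep_len if k else 0); if width > max_chars: break; k += 1' then 'items[:k]'
def trimLoopB (max_chars : Int) (sep_len : Nat) : List String → Nat → Nat → Nat
  | [], k, _ => k
  | item :: rest, k, width =>
      let w := width + item.toList.length + (if k = 0 then 0 else sep_len)
      if max_chars < (w : Int) then k else trimLoopB max_chars sep_len rest (k + 1) w

def trim_items_to_width_py_alt (prefix_ : String) (items : List String) (max_chars : Int) (separator : String) : List String :=
  items.take (trimLoopB max_chars separator.toList.length items 0 prefix_.toList.length)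

-- ===== PRECONDITION & SPEC =====
def Spec_trim_items_to_width_py (prefix_ : String) (items : List String) (max_chars : Int) (separator : String) (out : List String) : Prop := out = trim_items_to_width_py_alt prefix_ items max_chars separator
instance (prefix_ : String) (items : List String) (max_chars : Int) (separator : String) (out : List String) : Decidable (Spec_trim_items_to_width_py prefix_ items max_chars separator out) := by unfold Spec_trim_items_to_width_py; infer_instance

-- ===== CLAIM (what is proved, stated in full; the proofs are below) =====
def Claim_equal_trim_items_to_width_py : Prop := ∀ (prefix_ : String) (items : List String) (max_chars : Int) (separator : String), Dom_trim_items_to_width_py prefix_ items max_chars separator → Spec_trim_items_to_width_py prefix_ items max_chars separator (trim_items_to_width_py prefix_ items max_chars separator)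

-- ===== LEMMAS AND PROOFS =====

-- rendered width of the first k items (Nat subtraction makes cost 0 = prefix length)
def pvCost (P S : Nat) (lens : List Nat) (k : Nat) : Nat :=
  P + (lens.take k).sum + (k - 1) * S

-- the fitting predicate used by the common characterisation (Bool, so findGreatest's
-- DecidablePred instance is found automatically)
def pvFit (P S : Nat) (m : Int) (lens : List Nat) (k : Nat) : Bool :=
  decide (0 < k) && decide ((pvCost P S lens k : Int) ≤ m)

theorem pvFit_iff (P S : Nat) (m : Int) (lens : List Nat) (k : Nat) :
    pvFit P S m lens k = true ↔ 0 < k ∧ (pvCost P S lens k : Int) ≤ m := by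
  simp [pvFit]

theorem pvCost_succ (P S : Nat) (lens : List Nat) (k : Nat) (x : Nat)
    (hx : lens.drop k = x :: (lens.drop (k + 1))) :
    pvCost P S lens (k + 1) = pvCost P S lens k + x + (if k = 0 then 0 else S) := by
  have htake : lens.take (k + 1) = lens.take k ++ [x] := by
    rw [List.take_add, hx]
    simp
  unfold pvCost
  rw [htake, List.sum_append]
  simp only [List.sum_cons, List.sum_nil]
  rcases Nat.eq_zero_or_pos k with hk | hk
  · subst hk; simp
  · rw [if_neg (by omega)]
    have hmul : (k + 1 - 1) * S = (k - 1) * S + S := by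
      have h1 : k + 1 - 1 = (k - 1) + 1 := by omega
      rw [h1, Nat.succ_mul]
    omega

theorem pvCost_mono (P S : Nat) (lens : List Nat) {j k : Nat} (h : j ≤ k) :
    pvCost P S lens j ≤ pvCost P S lens k := by
  unfold pvCost
  have hsum : (lens.take j).sum ≤ (lens.take k).sum := by
    have e : lens.take j = (lens.take k).take j := by
      rw [List.take_take]; congr 1; omega
    rw [e]
    conv_rhs => rw [← List.take_append_drop j (lens.take k)]
    rw [List.sum_append]
    exact Nat.le_add_right _ _
  have hmul : (j - 1) * S ≤ (k - 1) * S := Nat.mul_le_mul_right _ (by omega)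
  omega

-- length of the rendered string 'prefix + separator.join(ts)' for nonempty ts
theorem join_len (sep : List Char) (t : List Char) (ts : List (List Char)) :
    (PySem.Chars.join sep (t :: ts)).length
      = t.length + (ts.map List.length).sum + ts.length * sep.length := by
  induction ts generalizing t with
  | nil => simp [PySem.Chars.join_singleton]
  | cons b r ih =>
      rw [PySem.Chars.join_cons_cons]
      simp only [List.length_append, ih b, List.map_cons, List.sum_cons, List.length_cons]
      ring

theorem rendered_len (prefix_ separator : String) (t : String) (ts : List String) :
    PySem.Str.len (prefix_ ++ PySem.Str.join separator (t :: ts))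
      = ((prefix_.toList.length + ((t :: ts).map (fun s => s.toList.length)).sum
          + ts.length * separator.toList.length : Nat) : Int) := by
  rw [PySem.Str.len_eq, String.toList_append, PySem.Str.toList_join]
  congr 1
  simp only [List.length_append, List.map_cons, join_len, List.map_map, List.sum_cons,
    Function.comp_def, List.length_map]
  omega

-- A's loop on a prefix of the items returns the greatest fitting prefix
theorem trimLoopA_char (prefix_ separator : String) (m : Int) (items : List String) :
    ∀ j, j ≤ items.length →
      trimLoopA prefix_ separator m (items.take j)
        = items.take (Nat.findGreatest
            (fun n => pvFit prefix_.toList.length separator.toList.length m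
              (items.map (fun s => s.toList.length)) n = true) j) := by
  intro j
  induction j with
  | zero => intro _; simp [trimLoopA]
  | succ j ih =>
      intro hj
      set P := prefix_.toList.length with hP
      set S := separator.toList.length with hS
      set lens := items.map (fun s => s.toList.length) with hlens
      have hne : items.take (j + 1) ≠ [] := by
        intro h
        have hl : (items.take (j + 1)).length = j + 1 := by
          rw [List.length_take]; omega
        rw [h] at hl
        simp at hl
      obtain ⟨t, ts, hts⟩ : ∃ t ts, items.take (j + 1) = t :: ts := by
        cases h : items.take (j + 1) with
        | nil => exact absurd h hne
        | cons t ts => exact ⟨t, ts, rfl⟩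
      have hlen_ts : ts.length = j := by
        have h1 : (items.take (j + 1)).length = j + 1 := by
          rw [List.length_take]; omega
        rw [hts] at h1
        simpa using h1
      have hmap : (t :: ts).map (fun s => s.toList.length) = lens.take (j + 1) := by
        rw [hlens, ← hts, List.map_take]
      have hcosteq : PySem.Str.len (prefix_ ++ PySem.Str.join separator (items.take (j + 1)))
          = (pvCost P S lens (j + 1) : Int) := by
        rw [hts, rendered_len, hmap, hlen_ts]
        congr 1
      rw [trimLoopA, dif_neg hne, hcosteq]
      rw [Nat.findGreatest_succ]
      by_cases hfit : (pvCost P S lens (j + 1) : Int) ≤ m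
      · rw [if_pos hfit, if_pos ((pvFit_iff P S m lens (j + 1)).mpr ⟨Nat.succ_pos j, hfit⟩)]
      · rw [if_neg hfit, if_neg (fun h => hfit ((pvFit_iff P S m lens (j + 1)).mp h).2)]
        have hdl : (items.take (j + 1)).dropLast = items.take j := by
          rw [List.dropLast_eq_take, List.take_take]
          congr 1
          rw [List.length_take]
          omega
        rw [hdl]
        exact ih (by omega)

-- B's loop: from any fitting position k it returns the greatest fitting prefix
theorem trimLoopB_char (prefix_ separator : String) (m : Int) (items : List String) :
    ∀ (k : Nat), k ≤ items.length →
      (k = 0 ∨ pvFit prefix_.toList.length separator.toList.length m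
                 (items.map (fun s => s.toList.length)) k = true) →
      trimLoopB m separator.toList.length (items.drop k) k
          (pvCost prefix_.toList.length separator.toList.length
            (items.map (fun s => s.toList.length)) k)
        = Nat.findGreatest
            (fun n => pvFit prefix_.toList.length separator.toList.length m
              (items.map (fun s => s.toList.length)) n = true) items.length := by
  set P := prefix_.toList.length with hP
  set S := separator.toList.length with hS
  set lens := items.map (fun s => s.toList.length) with hlens
  intro k
  have main : ∀ (rest : List String) (k : Nat), rest = items.drop k → k ≤ items.length →
      (k = 0 ∨ pvFit P S m lens k) →
      trimLoopB m S rest k (pvCost P S lens k)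
        = Nat.findGreatest (fun n => pvFit P S m lens n = true) items.length := by
    intro rest
    induction rest with
    | nil =>
        intro k hrest hk hfit
        have hkn : k = items.length := by
          have h1 := congrArg List.length hrest
          simp only [List.length_nil, List.length_drop] at h1
          omega
        subst hkn
        rw [trimLoopB]
        symm
        rw [Nat.findGreatest_eq_iff]
        refine ⟨le_rfl, fun h0 => ?_, ?_⟩
        · rcases hfit with h | h
          · exact absurd h h0
          · exact h
        · intro n hn hn' _
          omega
    | cons item rest ih =>
        intro k hrest hk hfit
        have hitem : items.drop k = item :: rest := hrest.symm
        have hklt : k < items.length := by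
          have h1 := congrArg List.length hitem
          simp only [List.length_drop, List.length_cons] at h1
          omega
        have hlensdrop : lens.drop k = item.toList.length :: (lens.drop (k + 1)) := by
          have h1 : lens.drop k = (items.drop k).map (fun s => s.toList.length) := by
            simp [hlens, List.map_drop]
          have h2 : lens.drop (k + 1) = (items.drop (k + 1)).map (fun s => s.toList.length) := by
            simp [hlens, List.map_drop]
          rw [h1, h2, hitem]
          have h3 : items.drop (k + 1) = rest := by
            rw [← List.tail_drop, hitem]
            rfl
          rw [h3, List.map_cons]
        have hcost : pvCost P S lens k + item.toList.length + (if k = 0 then 0 else S)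
            = pvCost P S lens (k + 1) := (pvCost_succ P S lens k _ hlensdrop).symm
        rw [trimLoopB]
        simp only [hcost]
        by_cases hov : m < (pvCost P S lens (k + 1) : Int)
        · rw [if_pos hov]
          symm
          rw [Nat.findGreatest_eq_iff]
          refine ⟨by omega, fun h0 => ?_, ?_⟩
          · rcases hfit with h | h
            · exact absurd h h0
            · exact h
          · intro n hn hn' hfitn
            have hmono : (pvCost P S lens (k + 1) : Int) ≤ (pvCost P S lens n : Int) := by
              exact_mod_cast pvCost_mono P S lens (by omega : k + 1 ≤ n)
            have h2 := ((pvFit_iff P S m lens n).mp hfitn).2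
            omega
        · rw [if_neg hov]
          have hrest' : rest = items.drop (k + 1) := by
            rw [← List.tail_drop, hitem]
            rfl
          exact ih (k + 1) hrest' (by omega) (Or.inr ((pvFit_iff P S m lens (k + 1)).mpr ⟨by omega, by omega⟩))
  exact fun hk hfit => main (items.drop k) k rfl hk hfit

-- ===== VERDICT (by name: the statement is the Claim_ definition above) =====
theorem trim_items_to_width_py_spec : Claim_equal_trim_items_to_width_py := by
  intro prefix_ items max_chars separator _
  unfold Spec_trim_items_to_width_py trim_items_to_width_py trim_items_to_width_py_alt
  have hA := trimLoopA_char prefix_ separator max_chars items items.length le_rfl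
  rw [List.take_of_length_le le_rfl] at hA
  have hB := trimLoopB_char prefix_ separator max_chars items 0 (Nat.zero_le _) (Or.inl rfl)
  simp only [List.drop_zero] at hB
  have hcost0 : pvCost prefix_.toList.length separator.toList.length
      (items.map (fun s => s.toList.length)) 0 = prefix_.toList.length := by
    unfold pvCost; simp
  rw [hcost0] at hB
  rw [hA, hB]
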